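-- pv_equiv track=rewrite | github.com/dawoodaijaz97/Leetcode | maximum-product-of-two-integers-with-no-common-bits/solution.py | solve
-- ===== SOURCE A (Python) =====
-- def solve(nums: list[int]) -> int:
--     max_product = 0
--     n = len(nums)
--
--     # Sort numbers in descending order
--     nums.sort(reverse=True)
--
--     # Precompute the bitwise AND of all pairs to check for common bits
--     and_results = [[0] * n for _ in range(n)]
--     for i in range(n):
--         for j in range(i + 1, n):
--             and_results[i][j] = nums[i] & nums[j]
--
--     # Iterate over all pairs to find the maximum product with no common bits
--     for i in range(n):
--         for j in range(i + 1, n):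
--             if and_results[i][j] == 0:
--                 max_product = max(max_product, nums[i] * nums[j])
--
--     return max_product
-- ===== SOURCE B (Python) =====
-- def solve(nums: list[int]) -> int:
--     # distinct positive values, largest first (non-positive values never beat the initial 0)
--     vals = sorted({x for x in nums if x > 0}, reverse=True)
--     best = 0
--     m = len(vals)
--     for i in range(m):
--         v = vals[i]
--         if v * v <= best:
--             break  # all remaining products are smaller
--         for j in range(i + 1, m):
--             p = v * vals[j]
--             if p <= best:
--                 break  # products only shrink from here
--             if v & vals[j] == 0:
--                 best = p
--     return best
-- ===== Notes on version B (the rewrite author's own statement) =====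
-- stated objective: faster
-- what changed: Instead of sorting in place, precomputing an n-by-n AND matrix and then scanning all pairs, B reduces to the distinct positive values sorted descending and does a pruned scan that breaks out of both loops as soon as the remaining products cannot exceed the best found (non-positive values can never beat the initial 0).
import Mathlib
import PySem

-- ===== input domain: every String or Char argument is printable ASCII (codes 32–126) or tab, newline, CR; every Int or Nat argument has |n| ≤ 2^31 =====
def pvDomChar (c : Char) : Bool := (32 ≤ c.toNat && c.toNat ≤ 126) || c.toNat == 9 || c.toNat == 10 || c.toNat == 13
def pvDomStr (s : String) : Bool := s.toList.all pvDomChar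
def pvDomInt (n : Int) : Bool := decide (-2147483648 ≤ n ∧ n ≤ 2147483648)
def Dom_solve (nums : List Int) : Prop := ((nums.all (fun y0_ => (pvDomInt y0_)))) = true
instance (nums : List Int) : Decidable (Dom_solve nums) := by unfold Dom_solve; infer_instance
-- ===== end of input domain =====

-- B replaces A's in-place sort + n×n AND matrix + full pair scan by a pruned scan over the
-- distinct positive values sorted descending (objective: faster, constant-factor/pruning).
-- A sorts its argument in place; B does not mutate it — the equivalence proved here is about
-- the RETURN value only.

-- ===== PORT A =====
def solve (nums : List Int) : Int :=
  let max_product : Int := 0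
  let n : Int := (nums.length : Int)
  -- nums.sort(reverse=True) (in-place; modelled by shadowing)
  let nums1 := PySem.List.sorted nums (fun x => x) true
  -- and_results = [[0] * n for _ in range(n)]  ([0]*n = replicate; n = len(nums) ≥ 0, exact)
  let and_results : List (List Int) :=
    (PySem.List.pyRange 0 n 1).map (fun _ => List.replicate n.toNat (0 : Int))
  -- for i in range(n): for j in range(i+1, n): and_results[i][j] = nums[i] & nums[j]
  -- (the element assignment 'and_results[i][j] = v' is ported as pySetD on row i, exact here
  --  since every index produced by range(n) is nonnegative and in range)
  let and_results :=
    (PySem.List.pyRange 0 n 1).foldl (fun m i =>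
      (PySem.List.pyRange (i+1) n 1).foldl (fun m j =>
        PySem.List.pySetD m i (PySem.List.pySetD (PySem.List.pyGetD m i []) j
          (PySem.Int.band (PySem.List.pyGetD nums1 i 0) (PySem.List.pyGetD nums1 j 0)))) m) and_results
  -- for i in range(n): for j in range(i+1, n): if and_results[i][j] == 0: max_product = max(...)
  let max_product :=
    (PySem.List.pyRange 0 n 1).foldl (fun mp i =>
      (PySem.List.pyRange (i+1) n 1).foldl (fun mp j =>
        if PySem.List.pyGetD (PySem.List.pyGetD and_results i []) j 0 = 0
        then max mp (PySem.List.pyGetD nums1 i 0 * PySem.List.pyGetD nums1 j 0) else mp) mp) max_product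
  max_product

-- ===== PORT B =====
-- inner loop of B: for j in range(i+1, m): p = v*vals[j]; if p <= best: break; if v & vals[j] == 0: best = p
def solveAltInner (v : Int) : List Int → Int → Int
  | [], best => best
  | w :: rest, best =>
    let p := v * w
    if p ≤ best then best
    else solveAltInner v rest (if PySem.Int.band v w = 0 then p else best)

-- outer loop of B: for i in range(m): v = vals[i]; if v*v <= best: break; <inner loop>
def solveAltOuter : List Int → Int → Int
  | [], best => best
  | v :: rest, best =>
    if v * v ≤ best then best
    else solveAltOuter rest (solveAltInner v rest best)

def solve_alt (nums : List Int) : Int :=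
  -- vals = sorted({x for x in nums if x > 0}, reverse=True)
  let vals := PySem.List.sorted (PySem.Set.ofList (nums.filter (fun x => 0 < x))) (fun x => x) true
  solveAltOuter vals 0

-- ===== PRECONDITION & SPEC =====
def Spec_solve (nums : List Int) (out : Int) : Prop := out = solve_alt nums
instance (nums : List Int) (out : Int) : Decidable (Spec_solve nums out) := by unfold Spec_solve; infer_instance

-- ===== CLAIM (what is proved, stated in full; the proofs are below) =====
def Claim_equal_solve : Prop := ∀ (nums : List Int), Dom_solve nums → Spec_solve nums (solve nums)

-- ===== LEMMAS AND PROOFS =====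

-- Both programs compute: max(0, max over pairs of distinct positions with disjoint bits of the
-- product).  We characterise that value by the predicate `Good` (which only looks at MEMBERSHIP,
-- so sorting/dedup does not disturb it), show it is unique, and prove both ports satisfy it.

def Good (l : List Int) (r : Int) : Prop :=
  0 ≤ r ∧
  (r = 0 ∨ ∃ x ∈ l, ∃ y ∈ l, x ≠ y ∧ PySem.Int.band x y = 0 ∧ r = x * y) ∧
  (∀ x ∈ l, ∀ y ∈ l, x ≠ y → PySem.Int.band x y = 0 → x * y ≤ r)

theorem Good_unique (l : List Int) (r r' : Int) (h : Good l r) (h' : Good l r') : r = r' := by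
  obtain ⟨h0, hex, hb⟩ := h
  obtain ⟨h0', hex', hb'⟩ := h'
  apply le_antisymm
  · rcases hex with rfl | ⟨x, hx, y, hy, hxy, hband, rfl⟩
    · exact h0'
    · exact hb' x hx y hy hxy hband
  · rcases hex' with rfl | ⟨x, hx, y, hy, hxy, hband, rfl⟩
    · exact h0
    · exact hb x hx y hy hxy hband

-- two negative ints always share (high) bits
theorem band_neg_neg (x y : Int) (hx : x < 0) (hy : y < 0) : PySem.Int.band x y ≠ 0 := by
  unfold PySem.Int.band
  split_ifs with h1 h2 h2 <;> omega

-- ---------- canonical pair fold (A's second double loop, re-expressed structurally) ----------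

def innerA (v : Int) (ws : List Int) (mp : Int) : Int :=
  ws.foldl (fun mp w => if PySem.Int.band v w = 0 then max mp (v * w) else mp) mp

def pairsFold : List Int → Int → Int
  | [], mp => mp
  | v :: rest, mp => pairsFold rest (innerA v rest mp)

theorem innerA_ge (v : Int) (ws : List Int) (mp : Int) : mp ≤ innerA v ws mp := by
  induction ws generalizing mp with
  | nil => simp [innerA]
  | cons w rest ih =>
    simp only [innerA, List.foldl_cons]
    split
    · exact le_trans (le_max_left _ _) (ih (max mp (v * w)))
    · exact ih mp

theorem innerA_attain (v : Int) (ws : List Int) (mp : Int) :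
    innerA v ws mp = mp ∨ ∃ w ∈ ws, PySem.Int.band v w = 0 ∧ innerA v ws mp = v * w := by
  induction ws generalizing mp with
  | nil => simp [innerA]
  | cons w rest ih =>
    simp only [innerA, List.foldl_cons]
    by_cases h : PySem.Int.band v w = 0
    · rw [if_pos h]
      rcases ih (max mp (v * w)) with h' | ⟨w', hw', hb', he'⟩
      · rcases max_choice mp (v * w) with hm | hm
        · left; rw [innerA] at h'; rw [h', hm]
        · right; exact ⟨w, List.mem_cons_self, h, by rw [innerA] at h'; rw [h', hm]⟩
      · right; exact ⟨w', List.mem_cons_of_mem _ hw', hb', he'⟩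
    · rw [if_neg h]
      rcases ih mp with h' | ⟨w', hw', hb', he'⟩
      · left; rw [innerA] at h'; rw [h']
      · right; exact ⟨w', List.mem_cons_of_mem _ hw', hb', he'⟩

theorem innerA_bound (v : Int) (ws : List Int) (mp : Int) :
    ∀ w ∈ ws, PySem.Int.band v w = 0 → v * w ≤ innerA v ws mp := by
  induction ws generalizing mp with
  | nil => simp
  | cons w rest ih =>
    intro w' hw' hb'
    simp only [innerA, List.foldl_cons]
    rcases List.mem_cons.mp hw' with rfl | hw'
    · rw [if_pos hb']
      exact le_trans (le_max_right _ _) (innerA_ge v rest _)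
    · split
      · exact ih _ w' hw' hb'
      · exact ih _ w' hw' hb'

theorem pairsFold_ge (l : List Int) (mp : Int) : mp ≤ pairsFold l mp := by
  induction l generalizing mp with
  | nil => simp [pairsFold]
  | cons v rest ih => exact le_trans (innerA_ge v rest mp) (ih _)

theorem pairsFold_attain (l : List Int) (mp : Int) :
    pairsFold l mp = mp ∨ ∃ x ∈ l, ∃ y ∈ l, PySem.Int.band x y = 0 ∧ pairsFold l mp = x * y := by
  induction l generalizing mp with
  | nil => simp [pairsFold]
  | cons v rest ih =>
    rw [pairsFold]
    rcases ih (innerA v rest mp) with h | ⟨x, hx, y, hy, hb, he⟩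
    · rw [h]
      rcases innerA_attain v rest mp with h' | ⟨w, hw, hb, he⟩
      · left; exact h'
      · right
        exact ⟨v, List.mem_cons_self, w, List.mem_cons_of_mem _ hw, hb, he⟩
    · right
      exact ⟨x, List.mem_cons_of_mem _ hx, y, List.mem_cons_of_mem _ hy, hb, he⟩

theorem pairsFold_bound (l : List Int) (mp : Int) :
    ∀ x ∈ l, ∀ y ∈ l, x ≠ y → PySem.Int.band x y = 0 → x * y ≤ pairsFold l mp := by
  induction l generalizing mp with
  | nil => simp
  | cons v rest ih =>
    intro x hx y hy hxy hb
    rw [pairsFold]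
    rcases List.mem_cons.mp hx with rfl | hx2
    · rcases List.mem_cons.mp hy with rfl | hy2
      · exact absurd rfl hxy
      · exact le_trans (innerA_bound x rest mp y hy2 hb) (pairsFold_ge rest _)
    · rcases List.mem_cons.mp hy with rfl | hy2
      · have hb' : PySem.Int.band y x = 0 := by rw [PySem.Int.band_comm]; exact hb
        rw [mul_comm]
        exact le_trans (innerA_bound y rest mp x hx2 hb') (pairsFold_ge rest _)
      · exact ih _ x hx2 y hy2 hxy hb

theorem Good_pairsFold (l : List Int) : Good l (pairsFold l 0) := by
  refine ⟨pairsFold_ge l 0, ?_, fun x hx y hy hxy hb => pairsFold_bound l 0 x hx y hy hxy hb⟩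
  rcases pairsFold_attain l 0 with h | ⟨x, hx, y, hy, hb, he⟩
  · left; exact h
  · by_cases hxy : x = y
    · subst hxy
      rw [PySem.Int.band_self] at hb
      left; rw [he, hb, mul_zero]
    · right; exact ⟨x, hx, y, hy, hxy, hb, he⟩

-- ---------- the matrix of A ----------

def rd (m : List (List Int)) (i j : Int) : Int :=
  PySem.List.pyGetD (PySem.List.pyGetD m i []) j 0

def wr (m : List (List Int)) (i j v : Int) : List (List Int) :=
  PySem.List.pySetD m i (PySem.List.pySetD (PySem.List.pyGetD m i []) j v)

def Shape (m : List (List Int)) (n : Nat) : Prop :=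
  m.length = n ∧ ∀ r ∈ m, r.length = n

theorem pyGetD_toNat {α : Type} (xs : List α) (i : Int) (d : α) (hi : 0 ≤ i) :
    PySem.List.pyGetD xs i d = xs.getD i.toNat d := by
  conv_lhs => rw [← Int.toNat_of_nonneg hi]
  rw [PySem.List.pyGetD_natCast]

theorem rd_toNat (m : List (List Int)) (i j : Int) (hi : 0 ≤ i) (hj : 0 ≤ j) :
    rd m i j = (m.getD i.toNat []).getD j.toNat 0 := by
  rw [rd, pyGetD_toNat _ _ _ hi, pyGetD_toNat _ _ _ hj]

theorem wr_toNat (m : List (List Int)) (i j v : Int) (hi : 0 ≤ i) (hj : 0 ≤ j) :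
    wr m i j v = m.set i.toNat ((m.getD i.toNat []).set j.toNat v) := by
  rw [wr, PySem.List.pySetD_of_nonneg _ _ hi, PySem.List.pySetD_of_nonneg _ _ hj,
    pyGetD_toNat _ _ _ hi]

theorem Shape_wr (m : List (List Int)) (n : Nat) (i j v : Int)
    (hm : Shape m n) (hi : 0 ≤ i) (hj : 0 ≤ j) : Shape (wr m i j v) n := by
  rw [wr_toNat _ _ _ _ hi hj]
  obtain ⟨hlen, hrows⟩ := hm
  by_cases hin : i.toNat < m.length
  · refine ⟨by rw [List.length_set]; exact hlen, ?_⟩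
    intro r hr
    obtain ⟨t, ht, hrt⟩ := List.mem_iff_getElem.mp hr
    by_cases hti : t = i.toNat
    · subst hti
      rw [List.getElem_set_self] at hrt
      rw [← hrt, List.length_set, List.getD_eq_getElem _ _ hin]
      exact hrows _ (List.getElem_mem hin)
    · have : (m.set i.toNat ((m.getD i.toNat []).set j.toNat v))[t]? = m[t]? :=
        List.getElem?_set_ne (fun h => hti h.symm)
      rw [List.getElem?_eq_getElem ht] at this
      have ht' : t < m.length := by simpa [List.length_set] using ht
      rw [List.getElem?_eq_getElem ht'] at this
      rw [← hrt]
      have : (m.set i.toNat ((m.getD i.toNat []).set j.toNat v))[t] = m[t] :=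
        Option.some_injective _ this
      rw [this]
      exact hrows _ (List.getElem_mem ht')
  · rw [List.set_eq_of_length_le (by omega)]
    exact ⟨hlen, hrows⟩

theorem rd_wr_eq (m : List (List Int)) (n : Nat) (i j v : Int)
    (hm : Shape m n) (hi : 0 ≤ i) (hj : 0 ≤ j) (hi' : i.toNat < n) (hj' : j.toNat < n) :
    rd (wr m i j v) i j = v := by
  obtain ⟨hlen, hrows⟩ := hm
  have hin : i.toNat < m.length := by omega
  have hrow : (m.getD i.toNat []).length = n := by
    rw [List.getD_eq_getElem _ _ hin]
    exact hrows _ (List.getElem_mem hin)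
  rw [rd_toNat _ _ _ hi hj, wr_toNat _ _ _ _ hi hj]
  have h1 : (m.set i.toNat ((m.getD i.toNat []).set j.toNat v)).getD i.toNat [] =
      (m.getD i.toNat []).set j.toNat v := by
    rw [List.getD_eq_getElem _ _ (by rw [List.length_set]; exact hin),
      List.getElem_set_self]
  rw [h1]
  rw [List.getD_eq_getElem _ _ (by rw [List.length_set]; omega),
    List.getElem_set_self]

theorem rd_wr_ne (m : List (List Int)) (i j i' j' v : Int)
    (hi : 0 ≤ i) (hj : 0 ≤ j) (hi' : 0 ≤ i') (hj' : 0 ≤ j')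
    (hne : ¬ (i = i' ∧ j = j')) : rd (wr m i' j' v) i j = rd m i j := by
  rw [rd_toNat _ _ _ hi hj, rd_toNat _ _ _ hi hj, wr_toNat _ _ _ _ hi' hj']
  by_cases hii : i = i'
  · subst hii
    have hjj : j ≠ j' := fun h => hne ⟨rfl, h⟩
    by_cases hin : i.toNat < m.length
    · have h1 : (m.set i.toNat ((m.getD i.toNat []).set j'.toNat v)).getD i.toNat [] =
          (m.getD i.toNat []).set j'.toNat v := by
        rw [List.getD_eq_getElem _ _ (by rw [List.length_set]; exact hin),
          List.getElem_set_self]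
      rw [h1, List.getD_eq_getElem?_getD, List.getElem?_set_ne (by omega),
        ← List.getD_eq_getElem?_getD]
    · rw [List.set_eq_of_length_le (by omega)]
  · have h2 : (m.set i'.toNat ((m.getD i'.toNat []).set j'.toNat v)).getD i.toNat [] =
        m.getD i.toNat [] := by
      rw [List.getD_eq_getElem?_getD, List.getElem?_set_ne (by omega),
        ← List.getD_eq_getElem?_getD]
    rw [h2]

def innerW (i : Int) (w : Int → Int) (js : List Int) (m : List (List Int)) : List (List Int) :=
  js.foldl (fun m j => wr m i j (w j)) m

def outerW (n : Int) (w : Int → Int → Int) (is : List Int) (m : List (List Int)) :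
    List (List Int) :=
  is.foldl (fun m i => innerW i (w i) (PySem.List.pyRange (i+1) n 1) m) m

theorem Shape_innerW (i : Int) (w : Int → Int) (js : List Int) (m : List (List Int)) (n : Nat)
    (hm : Shape m n) (hi : 0 ≤ i) (hjs : ∀ j ∈ js, 0 ≤ j) : Shape (innerW i w js m) n := by
  induction js generalizing m with
  | nil => exact hm
  | cons j0 rest ih =>
    rw [innerW, List.foldl_cons]
    exact ih _ (Shape_wr _ _ _ _ _ hm hi (hjs j0 List.mem_cons_self))
      (fun j hj => hjs j (List.mem_cons_of_mem _ hj))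

theorem rd_innerW_ne (i : Int) (w : Int → Int) (js : List Int) (m : List (List Int))
    (i' j : Int) (hi : 0 ≤ i) (hi' : 0 ≤ i') (hj : 0 ≤ j) (hjs : ∀ j' ∈ js, 0 ≤ j')
    (hne : i' ≠ i) : rd (innerW i w js m) i' j = rd m i' j := by
  induction js generalizing m with
  | nil => rfl
  | cons j0 rest ih =>
    rw [show innerW i w (j0 :: rest) m = innerW i w rest (wr m i j0 (w j0)) from rfl]
    rw [ih _ (fun j' hj' => hjs j' (List.mem_cons_of_mem _ hj'))]
    exact rd_wr_ne _ _ _ _ _ _ hi' hj hi (hjs j0 List.mem_cons_self)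
      (fun h => hne h.1)

theorem rd_innerW_not_mem (i : Int) (w : Int → Int) (js : List Int) (m : List (List Int))
    (j : Int) (hi : 0 ≤ i) (hj : 0 ≤ j) (hjs : ∀ j' ∈ js, 0 ≤ j')
    (hnm : j ∉ js) : rd (innerW i w js m) i j = rd m i j := by
  induction js generalizing m with
  | nil => rfl
  | cons j0 rest ih =>
    rw [show innerW i w (j0 :: rest) m = innerW i w rest (wr m i j0 (w j0)) from rfl]
    rw [ih _ (fun j' hj' => hjs j' (List.mem_cons_of_mem _ hj'))
      (fun h => hnm (List.mem_cons_of_mem _ h))]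
    exact rd_wr_ne _ _ _ _ _ _ hi hj hi (hjs j0 List.mem_cons_self)
      (fun h => hnm (h.2 ▸ List.mem_cons_self))

theorem rd_innerW_mem (i : Int) (w : Int → Int) (js : List Int) (m : List (List Int)) (n : Nat)
    (j : Int) (hm : Shape m n) (hi : 0 ≤ i) (hj : 0 ≤ j) (hjs : ∀ j' ∈ js, 0 ≤ j')
    (hnd : js.Nodup) (hi' : i.toNat < n) (hjn : j.toNat < n) (hmem : j ∈ js) :
    rd (innerW i w js m) i j = w j := by
  induction js generalizing m with
  | nil => exact absurd hmem (List.not_mem_nil)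
  | cons j0 rest ih =>
    rw [show innerW i w (j0 :: rest) m = innerW i w rest (wr m i j0 (w j0)) from rfl]
    rcases List.pairwise_cons.mp hnd with ⟨hj0, hndr⟩
    have hj0n : 0 ≤ j0 := hjs j0 List.mem_cons_self
    have hm' : Shape (wr m i j0 (w j0)) n := Shape_wr _ _ _ _ _ hm hi hj0n
    rcases List.mem_cons.mp hmem with rfl | hmemr
    · have : j ∉ rest := fun h => (hj0 j h) rfl
      rw [rd_innerW_not_mem i w rest _ j hi hj
        (fun j' hj' => hjs j' (List.mem_cons_of_mem _ hj')) this]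
      exact rd_wr_eq _ _ _ _ _ hm hi hj hi' hjn
    · exact ih _ hm' (fun j' hj' => hjs j' (List.mem_cons_of_mem _ hj')) hndr hmemr

theorem rd_outerW (n : Int) (w : Int → Int → Int) (is : List Int) (m : List (List Int))
    (N : Nat) (i j : Int) (hm : Shape m N) (hn : n = (N : Int))
    (his : ∀ i' ∈ is, 0 ≤ i') (hnd : is.Nodup) (hi : 0 ≤ i) (hj : 0 ≤ j) :
    rd (outerW n w is m) i j =
      if i ∈ is ∧ i < j ∧ j < n then w i j else rd m i j := by
  induction is generalizing m with
  | nil => simp [outerW]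
  | cons i0 rest ih =>
    rw [outerW, List.foldl_cons]
    rcases List.pairwise_cons.mp hnd with ⟨hi0r, hndr⟩
    have hi0 : 0 ≤ i0 := his i0 List.mem_cons_self
    have hjsnn : ∀ j' ∈ PySem.List.pyRange (i0+1) n 1, 0 ≤ j' :=
      fun j' hj' => by have := PySem.List.mem_pyRange_one.mp hj'; omega
    have hm' : Shape (innerW i0 (w i0) (PySem.List.pyRange (i0+1) n 1) m) N :=
      Shape_innerW _ _ _ _ _ hm hi0 hjsnn
    have hrest := ih (innerW i0 (w i0) (PySem.List.pyRange (i0+1) n 1) m) hm'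
      (fun i' hi' => his i' (List.mem_cons_of_mem _ hi')) hndr
    rw [show outerW n w rest (innerW i0 (w i0) (PySem.List.pyRange (i0+1) n 1) m) =
        List.foldl (fun m i => innerW i (w i) (PySem.List.pyRange (i+1) n 1) m)
          (innerW i0 (w i0) (PySem.List.pyRange (i0+1) n 1) m) rest from rfl] at *
    rw [hrest]
    by_cases hii : i = i0
    · subst hii
      have hnir : i ∉ rest := fun h => (hi0r i h) rfl
      rw [if_neg (fun h => hnir h.1)]
      by_cases hcond : i < j ∧ j < n
      · rw [if_pos ⟨List.mem_cons_self, hcond⟩]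
        exact rd_innerW_mem i (w i) _ m N j hm hi hj hjsnn
          (PySem.List.nodup_pyRange_one _ _) (by omega) (by omega)
          (PySem.List.mem_pyRange_one.mpr ⟨by omega, hcond.2⟩)
      · rw [if_neg (fun h => hcond h.2)]
        exact rd_innerW_not_mem i (w i) _ m j hi hj hjsnn
          (fun h => hcond (by have := PySem.List.mem_pyRange_one.mp h; omega))
    · rw [rd_innerW_ne i0 (w i0) _ m i j hi0 hi hj hjsnn hii]
      have : (i ∈ i0 :: rest ∧ i < j ∧ j < n) ↔ (i ∈ rest ∧ i < j ∧ j < n) := by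
        constructor
        · rintro ⟨h1, h2⟩
          exact ⟨(List.mem_cons.mp h1).resolve_left hii, h2⟩
        · rintro ⟨h1, h2⟩
          exact ⟨List.mem_cons_of_mem _ h1, h2⟩
      rw [if_congr this rfl rfl]

-- ---------- A's second double loop over ranges = pairsFold ----------

theorem nested_eq_pairsFold (s : List Int) (a mp : Int) (ha : 0 ≤ a) :
    (PySem.List.pyRange a (s.length : Int) 1).foldl (fun mp i =>
      (PySem.List.pyRange (i+1) (s.length : Int) 1).foldl (fun mp j =>
        if PySem.Int.band (PySem.List.pyGetD s i 0) (PySem.List.pyGetD s j 0) = 0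
        then max mp (PySem.List.pyGetD s i 0 * PySem.List.pyGetD s j 0) else mp) mp) mp
    = pairsFold (s.drop a.toNat) mp := by
  obtain ⟨k, hk⟩ : ∃ k, ((s.length : Int) - a).toNat = k := ⟨_, rfl⟩
  induction k generalizing a mp with
  | zero =>
    rw [PySem.List.pyRange_one_eq_nil (by omega), List.foldl_nil,
      List.drop_eq_nil_of_le (by omega), pairsFold]
  | succ k ih =>
    have hlt : a < (s.length : Int) := by omega
    rw [PySem.List.pyRange_one_cons hlt, List.foldl_cons]
    have hinner :
        (PySem.List.pyRange (a+1) (s.length : Int) 1).foldl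
          (fun mp j => if PySem.Int.band (PySem.List.pyGetD s a 0) (PySem.List.pyGetD s j 0) = 0
            then max mp (PySem.List.pyGetD s a 0 * PySem.List.pyGetD s j 0) else mp) mp
        = innerA (PySem.List.pyGetD s a 0) (s.drop (a+1).toNat) mp := by
      rw [innerA]
      exact PySem.List.foldl_pyRange_pyGetD' s 0
        (fun acc w => if PySem.Int.band (PySem.List.pyGetD s a 0) w = 0
          then max acc (PySem.List.pyGetD s a 0 * w) else acc) mp (by omega)
    rw [hinner, ih (a+1) _ (by omega) (by omega)]
    have han : a.toNat < s.length := by omega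
    have ha1 : (a+1).toNat = a.toNat + 1 := by omega
    rw [ha1, PySem.List.pyGetD_eq_getElem s 0 ha (by omega)]
    conv_rhs => rw [List.drop_eq_getElem_cons han, pairsFold]

theorem solve_eq_pairsFold (nums : List Int) :
    solve nums = pairsFold (PySem.List.sorted nums (fun x => x) true) 0 := by
  simp only [solve]
  set s := PySem.List.sorted nums (fun x => x) true with hs
  have hlen : (nums.length : Int) = (s.length : Int) := by
    rw [hs, PySem.List.length_sorted]
  rw [hlen]
  set n : Int := (s.length : Int) with hn
  set w : Int → Int → Int := fun i j =>
    PySem.Int.band (PySem.List.pyGetD s i 0) (PySem.List.pyGetD s j 0) with hw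
  set m0 : List (List Int) :=
    (PySem.List.pyRange 0 n 1).map (fun _ => List.replicate n.toNat (0 : Int)) with hm0
  have hm0shape : Shape m0 s.length := by
    constructor
    · rw [hm0, List.length_map, PySem.List.length_pyRange_one]; omega
    · intro r hr
      rcases List.mem_map.mp hr with ⟨_, _, rfl⟩
      rw [List.length_replicate]; omega
  have hbuild :
      (PySem.List.pyRange 0 n 1).foldl (fun m i =>
        (PySem.List.pyRange (i+1) n 1).foldl (fun m j =>
          PySem.List.pySetD m i (PySem.List.pySetD (PySem.List.pyGetD m i []) j
            (PySem.Int.band (PySem.List.pyGetD s i 0) (PySem.List.pyGetD s j 0)))) m) m0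
      = outerW n w (PySem.List.pyRange 0 n 1) m0 := rfl
  rw [hbuild]
  have hcongr :
      (PySem.List.pyRange 0 n 1).foldl (fun mp i =>
        (PySem.List.pyRange (i+1) n 1).foldl (fun mp j =>
          if PySem.List.pyGetD (PySem.List.pyGetD (outerW n w (PySem.List.pyRange 0 n 1) m0) i []) j 0 = 0
          then max mp (PySem.List.pyGetD s i 0 * PySem.List.pyGetD s j 0) else mp) mp) 0
      = (PySem.List.pyRange 0 n 1).foldl (fun mp i =>
        (PySem.List.pyRange (i+1) n 1).foldl (fun mp j =>
          if PySem.Int.band (PySem.List.pyGetD s i 0) (PySem.List.pyGetD s j 0) = 0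
          then max mp (PySem.List.pyGetD s i 0 * PySem.List.pyGetD s j 0) else mp) mp) 0 := by
    apply PySem.List.foldl_congr_mem
    intro mp i hi
    have hi' := PySem.List.mem_pyRange_one.mp hi
    apply PySem.List.foldl_congr_mem
    intro mp' j hj
    have hj' := PySem.List.mem_pyRange_one.mp hj
    have hread : PySem.List.pyGetD
        (PySem.List.pyGetD (outerW n w (PySem.List.pyRange 0 n 1) m0) i []) j 0 =
        w i j := by
      rw [show PySem.List.pyGetD
          (PySem.List.pyGetD (outerW n w (PySem.List.pyRange 0 n 1) m0) i []) j 0 =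
          rd (outerW n w (PySem.List.pyRange 0 n 1) m0) i j from rfl]
      rw [rd_outerW n w _ m0 s.length i j hm0shape hn
        (fun i' hi'' => by have := PySem.List.mem_pyRange_one.mp hi''; omega)
        (PySem.List.nodup_pyRange_one _ _) (by omega) (by omega)]
      rw [if_pos ⟨hi, by omega, hj'.2⟩]
    rw [hread, hw]
  rw [hcongr]
  rw [hn, nested_eq_pairsFold s 0 0 (by omega)]
  simp

-- ---------- B's pruned scan ----------

theorem innerB_ge (v : Int) (ws : List Int) (best : Int) : best ≤ solveAltInner v ws best := by
  induction ws generalizing best with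
  | nil => simp [solveAltInner]
  | cons w rest ih =>
    rw [solveAltInner]
    by_cases h : v * w ≤ best
    · simp [h]
    · rw [if_neg h]
      refine le_trans ?_ (ih _)
      split
      · omega
      · exact le_refl _

theorem innerB_attain (v : Int) (ws : List Int) (best : Int) :
    solveAltInner v ws best = best ∨
      ∃ w ∈ ws, PySem.Int.band v w = 0 ∧ solveAltInner v ws best = v * w := by
  induction ws generalizing best with
  | nil => simp [solveAltInner]
  | cons w rest ih =>
    rw [solveAltInner]
    by_cases h : v * w ≤ best
    · simp [h]
    · rw [if_neg h]
      by_cases hb : PySem.Int.band v w = 0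
      · rw [if_pos hb]
        rcases ih (v * w) with h' | ⟨w', hw', hb', he'⟩
        · right; exact ⟨w, List.mem_cons_self, hb, h'⟩
        · right; exact ⟨w', List.mem_cons_of_mem _ hw', hb', he'⟩
      · rw [if_neg hb]
        rcases ih best with h' | ⟨w', hw', hb', he'⟩
        · left; exact h'
        · right; exact ⟨w', List.mem_cons_of_mem _ hw', hb', he'⟩

theorem innerB_bound (v : Int) (ws : List Int) (best : Int)
    (hv : 0 < v) (hsort : ws.Pairwise (· > ·)) :
    ∀ w ∈ ws, PySem.Int.band v w = 0 → v * w ≤ solveAltInner v ws best := by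
  induction ws generalizing best with
  | nil => simp
  | cons w rest ih =>
    intro w' hw' hb'
    rw [solveAltInner]
    rcases List.pairwise_cons.mp hsort with ⟨hhead, htail⟩
    by_cases h : v * w ≤ best
    · -- break: every remaining product is at most v * w ≤ best
      rw [if_pos h]
      have hle : w' ≤ w := by
        rcases List.mem_cons.mp hw' with rfl | hw2
        · exact le_refl _
        · exact le_of_lt (hhead w' hw2)
      exact le_trans (mul_le_mul_of_nonneg_left hle (le_of_lt hv)) h
    · rw [if_neg h]
      rcases List.mem_cons.mp hw' with rfl | hw2
      · rw [if_pos hb']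
        exact innerB_ge v rest (v * w')
      · split
        · exact ih _ htail w' hw2 hb'
        · exact ih _ htail w' hw2 hb'

theorem outerB_ge (vals : List Int) (best : Int) : best ≤ solveAltOuter vals best := by
  induction vals generalizing best with
  | nil => simp [solveAltOuter]
  | cons v rest ih =>
    rw [solveAltOuter]
    split
    · exact le_refl _
    · exact le_trans (innerB_ge v rest best) (ih _)

theorem outerB_attain (vals : List Int) (best : Int) (hsort : vals.Pairwise (· > ·)) :
    solveAltOuter vals best = best ∨
      ∃ x ∈ vals, ∃ y ∈ vals, x ≠ y ∧ PySem.Int.band x y = 0 ∧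
        solveAltOuter vals best = x * y := by
  induction vals generalizing best with
  | nil => simp [solveAltOuter]
  | cons v rest ih =>
    rw [solveAltOuter]
    rcases List.pairwise_cons.mp hsort with ⟨hhead, htail⟩
    split
    · left; rfl
    · rcases ih (solveAltInner v rest best) htail with h' | ⟨x, hx, y, hy, hxy, hb, he⟩
      · rw [h']
        rcases innerB_attain v rest best with h'' | ⟨w, hw, hb, he⟩
        · left; exact h''
        · right
          exact ⟨v, List.mem_cons_self, w, List.mem_cons_of_mem _ hw,
            ne_of_gt (hhead w hw), hb, he⟩
      · right
        exact ⟨x, List.mem_cons_of_mem _ hx, y, List.mem_cons_of_mem _ hy, hxy, hb, he⟩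

theorem outerB_bound (vals : List Int) (best : Int)
    (hpos : ∀ v ∈ vals, 0 < v) (hsort : vals.Pairwise (· > ·)) :
    ∀ x ∈ vals, ∀ y ∈ vals, x ≠ y → PySem.Int.band x y = 0 →
      x * y ≤ solveAltOuter vals best := by
  induction vals generalizing best with
  | nil => simp
  | cons v rest ih =>
    intro x hx y hy hxy hband
    rw [solveAltOuter]
    rcases List.pairwise_cons.mp hsort with ⟨hhead, htail⟩
    have hxv : x ≤ v := by
      rcases List.mem_cons.mp hx with rfl | h2
      · exact le_refl _
      · exact le_of_lt (hhead x h2)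
    have hyv : y ≤ v := by
      rcases List.mem_cons.mp hy with rfl | h2
      · exact le_refl _
      · exact le_of_lt (hhead y h2)
    have hxpos : 0 < x := hpos x hx
    have hypos : 0 < y := hpos y hy
    have hvpos : 0 < v := hpos v List.mem_cons_self
    split
    · -- break: x * y ≤ v * v ≤ best
      rename_i hbreak
      calc x * y ≤ v * v :=
              mul_le_mul hxv hyv (le_of_lt hypos) (le_of_lt hvpos)
        _ ≤ best := hbreak
    · rcases List.mem_cons.mp hx with rfl | hx2
      · rcases List.mem_cons.mp hy with rfl | hy2
        · exact absurd rfl hxy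
        · exact le_trans (innerB_bound x rest best hxpos htail y hy2 hband)
            (outerB_ge rest _)
      · rcases List.mem_cons.mp hy with rfl | hy2
        · have hb' : PySem.Int.band y x = 0 := by rw [PySem.Int.band_comm]; exact hband
          rw [mul_comm]
          exact le_trans (innerB_bound y rest best hypos htail x hx2 hb')
            (outerB_ge rest _)
        · exact ih _ (fun z hz => hpos z (List.mem_cons_of_mem _ hz)) htail
            x hx2 y hy2 hxy hband

theorem Good_solve_alt (nums : List Int) : Good nums (solve_alt nums) := by
  have hvals : solve_alt nums =
      solveAltOuter (PySem.List.sorted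
        (PySem.Set.ofList (nums.filter (fun x => 0 < x))) (fun x => x) true) 0 := rfl
  set vals := PySem.List.sorted
      (PySem.Set.ofList (nums.filter (fun x => 0 < x))) (fun x => x) true with hv
  have hmem : ∀ x : Int, x ∈ vals ↔ x ∈ nums ∧ 0 < x := by
    intro x
    rw [hv, PySem.List.mem_sorted, PySem.Set.mem_ofList, List.mem_filter]
    simp
  have hpos : ∀ x ∈ vals, 0 < x := fun x hx => ((hmem x).mp hx).2
  have hnd : vals.Nodup := by
    rw [hv]
    exact ((PySem.List.sorted_perm _ _ _).nodup_iff).mpr (PySem.Set.nodup_ofList _)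
  have hge : vals.Pairwise (fun a b => b ≤ a) := by
    rw [hv]; exact PySem.List.sorted_pairwise_rev _ _
  have hsort : vals.Pairwise (· > ·) := by
    refine (hge.and hnd).imp ?_
    rintro a b ⟨h1, h2⟩
    exact lt_of_le_of_ne h1 (Ne.symm h2)
  rw [hvals]
  refine ⟨outerB_ge vals 0, ?_, ?_⟩
  · rcases outerB_attain vals 0 hsort with h | ⟨x, hx, y, hy, hxy, hb, he⟩
    · left; exact h
    · right
      exact ⟨x, ((hmem x).mp hx).1, y, ((hmem y).mp hy).1, hxy, hb, he⟩
  · intro x hx y hy hxy hband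
    by_cases hp : x * y ≤ 0
    · exact le_trans hp (outerB_ge vals 0)
    · have hp' : 0 < x * y := by omega
      rcases mul_pos_iff.mp hp' with ⟨hx0, hy0⟩ | ⟨hx0, hy0⟩
      · exact outerB_bound vals 0 hpos hsort x ((hmem x).mpr ⟨hx, hx0⟩)
          y ((hmem y).mpr ⟨hy, hy0⟩) hxy hband
      · exact absurd hband (band_neg_neg x y hx0 hy0)

theorem Good_solve (nums : List Int) : Good nums (solve nums) := by
  rw [solve_eq_pairsFold]
  obtain ⟨h0, hex, hb⟩ := Good_pairsFold (PySem.List.sorted nums (fun x => x) true)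
  refine ⟨h0, ?_, ?_⟩
  · rcases hex with h | ⟨x, hx, y, hy, hxy, hband, he⟩
    · left; exact h
    · right
      exact ⟨x, (PySem.List.mem_sorted _ _ _ _).mp hx,
        y, (PySem.List.mem_sorted _ _ _ _).mp hy, hxy, hband, he⟩
  · intro x hx y hy hxy hband
    exact hb x ((PySem.List.mem_sorted _ _ _ _).mpr hx)
      y ((PySem.List.mem_sorted _ _ _ _).mpr hy) hxy hband

-- ===== VERDICT (by name: the statement is the Claim_ definition above) =====
theorem solve_spec : Claim_equal_solve := by
  intro nums _
  unfold Spec_solve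
  exact Good_unique nums (solve nums) (solve_alt nums) (Good_solve nums) (Good_solve_alt nums)
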